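-- pv_equiv track=rewrite | github.com/itchecosta/empowerdata-python | bootcamp/desafio.py | contar_palavras
-- ===== SOURCE A (Python) =====
-- def contar_palavras(palavras):
--   contagem = {}
--   for palavra in palavras.split():
--     #if palavra in ['a','e','o','de']:
--     #  continue
--     if len(palavra) < 3:
--       continue
--     try:
--       contagem[palavra] += 1
--     except:
--       contagem[palavra] = 1
--   return contagem
-- ===== SOURCE B (Python) =====
-- def contar_palavras(palavras):
--     tokens = [p for p in palavras.split() if len(p) >= 3]
--     return {w: tokens.count(w) for w in dict.fromkeys(tokens)}
-- ===== Notes on version B (the rewrite author's own statement) =====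
-- stated objective: idiomatic
-- what changed: Replaces the incremental try/except dict-counter loop with a two-pass comprehension: filter the tokens once, then build the dict from the deduplicated keys with list.count per distinct word.
import Mathlib
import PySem

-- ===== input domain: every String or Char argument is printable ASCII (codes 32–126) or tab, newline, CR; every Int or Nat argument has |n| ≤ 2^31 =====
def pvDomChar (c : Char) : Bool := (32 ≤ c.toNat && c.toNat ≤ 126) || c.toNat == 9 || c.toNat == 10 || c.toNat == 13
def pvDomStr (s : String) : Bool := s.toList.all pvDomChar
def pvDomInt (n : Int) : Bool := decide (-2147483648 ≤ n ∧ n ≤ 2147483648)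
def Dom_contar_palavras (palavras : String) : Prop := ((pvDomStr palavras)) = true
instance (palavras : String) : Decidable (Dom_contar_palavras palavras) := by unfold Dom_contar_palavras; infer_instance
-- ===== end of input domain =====

-- B builds the count dict by a filter + dedup + per-word count comprehension instead of A's incremental try/except counter loop (idiomatic, same result).


-- ===== PORT A =====
-- 'contagem[palavra] += 1' with 'except: contagem[palavra] = 1' is insert (getD + 1)
def contar_palavras (palavras : String) : List (String × Int) :=
  ((PySem.Str.split₀ palavras).foldl
    (fun contagem palavra =>
      if PySem.Str.len palavra < 3 then contagem
      else contagem.insert palavra (contagem.getD palavra 0 + 1))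
    PySem.Dict.empty).items

-- ===== PORT B =====
def contar_palavras_alt (palavras : String) : List (String × Int) :=
  let tokens := (PySem.Str.split₀ palavras).filter (fun p => 3 ≤ PySem.Str.len p)
  (PySem.List.dedup tokens).map (fun w => (w, (tokens.count w : Int)))

-- ===== PRECONDITION & SPEC =====
def Spec_contar_palavras (palavras : String) (out : List (String × Int)) : Prop := out = contar_palavras_alt palavras
instance (palavras : String) (out : List (String × Int)) : Decidable (Spec_contar_palavras palavras out) := by unfold Spec_contar_palavras; infer_instance

-- ===== CLAIM (what is proved, stated in full; the proofs are below) =====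
def Claim_equal_contar_palavras : Prop := ∀ (palavras : String), Dom_contar_palavras palavras → Spec_contar_palavras palavras (contar_palavras palavras)

-- ===== LEMMAS AND PROOFS =====

-- A's skip-if-short loop is the counting loop over the kept tokens
theorem contar_palavras_eq_counter (palavras : String) :
    contar_palavras palavras =
      (PySem.Dict.counter ((PySem.Str.split₀ palavras).filter (fun p => 3 ≤ PySem.Str.len p))).items := by
  unfold contar_palavras
  have hshape : (PySem.Str.split₀ palavras).foldl
      (fun (contagem : PySem.Dict String Int) palavra =>
        if PySem.Str.len palavra < 3 then contagem
        else contagem.insert palavra (contagem.getD palavra 0 + 1)) PySem.Dict.empty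
      = (PySem.Str.split₀ palavras).foldl
      (fun contagem palavra =>
        if 3 ≤ PySem.Str.len palavra then contagem.insert palavra (contagem.getD palavra 0 + 1)
        else contagem) PySem.Dict.empty := by
    apply PySem.List.foldl_congr_mem
    intro acc x _
    by_cases h : PySem.Str.len x < 3
    · rw [if_pos h, if_neg (by omega)]
    · rw [if_neg h, if_pos (by omega)]
  refine congrArg PySem.Dict.items ?_
  refine hshape.trans ?_
  rw [PySem.List.foldl_ite_eq_foldl_filter,
      PySem.Dict.foldl_insert_getD_add_one_eq_counter]

-- ===== VERDICT (by name: the statement is the Claim_ definition above) =====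
theorem contar_palavras_spec : Claim_equal_contar_palavras := by
  intro palavras _
  unfold Spec_contar_palavras contar_palavras_alt
  rw [contar_palavras_eq_counter, PySem.Dict.items_counter]
  simp [PySem.List.dedup_eq_ofList]
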